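-- pv_equiv track=rewrite | github.com/zdenek-nemec/sandbox | codewars/how_green_is_my_valley.py | make_valley
-- ===== SOURCE A (Python) =====
-- def make_valley(arr: list) -> list:
--     arr_sorted = sorted(arr)
--     odd = []
--     even = []
--     for i, item in enumerate(arr_sorted):
--         if i % 2 == 0:
--             even.append(item)
--         else:
--             odd.append(item)
--     if len(arr_sorted) % 2 == 0:
--         return list(reversed(odd)) + even  # Because of tests
--     else:
--         return list(reversed(even)) + odd
-- ===== SOURCE B (Python) =====
-- def make_valley(arr: list) -> list:
--     # Closed-form positional construction: the j-th entry of the result is read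
--     # directly from the sorted list by an index formula, no buckets or reversal.
--     s = sorted(arr)
--     n = len(s)
--     h = (n + 1) // 2
--     # descending slope: s[n-1], s[n-3], ...  then ascending slope: s[n%2], s[n%2+2], ...
--     return [s[n - 1 - 2 * j] for j in range(h)] + \
--            [s[2 * j + n % 2] for j in range(n - h)]
-- ===== Notes on version B (the rewrite author's own statement) =====
-- stated objective: alternative
-- what changed: B builds the valley by a closed-form index mapping: each output position j is read directly from the sorted list (s[n-1-2j] on the descending slope, s[2j + n%2] on the ascending slope), replacing A's enumerate loop that distributes elements into odd/even-index buckets and concatenates them with a length-parity-dependent reversal.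
import Mathlib
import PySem

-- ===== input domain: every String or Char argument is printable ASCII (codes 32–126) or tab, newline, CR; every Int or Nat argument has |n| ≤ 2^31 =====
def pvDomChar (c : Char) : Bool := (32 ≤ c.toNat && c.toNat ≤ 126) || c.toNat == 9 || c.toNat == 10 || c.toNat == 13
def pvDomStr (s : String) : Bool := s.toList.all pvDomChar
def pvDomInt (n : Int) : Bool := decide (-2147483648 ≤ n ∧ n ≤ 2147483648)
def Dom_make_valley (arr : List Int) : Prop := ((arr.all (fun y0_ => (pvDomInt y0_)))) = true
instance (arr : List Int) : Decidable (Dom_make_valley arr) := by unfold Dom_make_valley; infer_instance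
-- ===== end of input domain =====

-- B reads each output position directly from the sorted list by a closed-form index formula,
-- replacing A's odd/even bucket distribution and length-parity-dependent reversal. Objective: alternative.

-- ===== PORT A =====
def make_valley (arr : List Int) : List Int :=
  let arr_sorted := PySem.List.sorted arr (fun x => x) false
  let st :=
    (PySem.List.enumerate arr_sorted 0).foldl
      (fun (st : List Int × List Int) p =>
        if PySem.Int.mod p.1 2 = 0 then (st.1, st.2 ++ [p.2]) else (st.1 ++ [p.2], st.2))
      ([], [])
  -- st.1 = odd, st.2 = even
  if PySem.Int.mod (PySem.List.len arr_sorted) 2 = 0 then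
    st.1.reverse ++ st.2
  else
    st.2.reverse ++ st.1

-- ===== PORT B =====
-- the comprehension indices n-1-2j (j < h) and 2j+n%2 (j < n-h) are provably in range,
-- so pyGetD with default 0 is exact here (the Python indexing never raises)
def make_valley_alt (arr : List Int) : List Int :=
  let s := PySem.List.sorted arr (fun x => x) false
  let n := PySem.List.len s
  let h := PySem.Int.floordiv (n + 1) 2
  ((PySem.List.pyRange 0 h 1).map (fun j => PySem.List.pyGetD s (n - 1 - 2 * j) 0)) ++
  ((PySem.List.pyRange 0 (n - h) 1).map (fun j => PySem.List.pyGetD s (2 * j + PySem.Int.mod n 2) 0))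

-- ===== PRECONDITION & SPEC =====
def Spec_make_valley (arr : List Int) (out : List Int) : Prop := out = make_valley_alt arr
instance (arr : List Int) (out : List Int) : Decidable (Spec_make_valley arr out) := by unfold Spec_make_valley; infer_instance

-- ===== CLAIM (what is proved, stated in full; the proofs are below) =====
def Claim_equal_make_valley : Prop := ∀ (arr : List Int), Dom_make_valley arr → Spec_make_valley arr (make_valley arr)

-- ===== LEMMAS AND PROOFS =====

-- (elements at even indices, elements at odd indices)
def eo : List Int → List Int × List Int
  | [] => ([], [])
  | x :: t => (x :: (eo t).2, (eo t).1)

theorem foldA (xs : List Int) : ∀ (n : Nat) (od ev : List Int),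
    (PySem.List.enumerate xs (n : Int)).foldl
      (fun (st : List Int × List Int) p =>
        if PySem.Int.mod p.1 2 = 0 then (st.1, st.2 ++ [p.2]) else (st.1 ++ [p.2], st.2))
      (od, ev) =
    if n % 2 = 0 then (od ++ (eo xs).2, ev ++ (eo xs).1)
    else (od ++ (eo xs).1, ev ++ (eo xs).2) := by
  induction xs with
  | nil => intro n od ev; simp [PySem.List.enumerate_nil, eo]
  | cons x t ih =>
    intro n od ev
    rw [PySem.List.enumerate_cons]
    have hc : (n : Int) + 1 = ((n + 1 : Nat) : Int) := by push_cast; ring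
    have hm : PySem.Int.mod (n : Int) 2 = ((n % 2 : Nat) : Int) := PySem.Int.mod_natCast n 2
    rcases Nat.even_or_odd n with he | ho
    · have h0 : n % 2 = 0 := Nat.even_iff.mp he
      simp only [List.foldl_cons, hm, h0, hc]
      rw [ih (n + 1)]
      have h1 : (n + 1) % 2 = 1 := by omega
      simp [h1, eo]
    · have h0 : n % 2 = 1 := Nat.odd_iff.mp ho
      simp only [List.foldl_cons, hm, h0, hc]
      rw [ih (n + 1)]
      have h1 : (n + 1) % 2 = 0 := by omega
      simp [h1, eo]

-- the two eo components as index maps into the list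
theorem eo_index (s : List Int) :
    (eo s).1 = (List.range ((s.length + 1) / 2)).map (fun j => s.getD (2 * j) 0) ∧
    (eo s).2 = (List.range (s.length / 2)).map (fun j => s.getD (2 * j + 1) 0) := by
  induction s with
  | nil => simp [eo]
  | cons x t ih =>
    constructor
    · have h : (t.length + 1 + 1) / 2 = t.length / 2 + 1 := by omega
      simp only [eo, List.length_cons, h, List.range_succ_eq_map, List.map_cons, List.map_map]
      refine congrArg₂ _ rfl ?_
      rw [ih.2]
      rfl
    · simp only [eo, List.length_cons]
      exact ih.1

theorem reverse_map_range (f : Nat → Int) (m : Nat) :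
    ((List.range m).map f).reverse = (List.range m).map (fun j => f (m - 1 - j)) := by
  induction m generalizing f with
  | zero => simp
  | succ m ih =>
    conv_lhs => rw [List.range_succ]
    conv_rhs => rw [List.range_succ_eq_map]
    simp only [List.map_append, List.reverse_append, List.map_cons, List.map_map,
      List.reverse_cons, List.reverse_nil, List.nil_append, List.map_nil]
    rw [ih]
    have h1 : m + 1 - 1 - 0 = m := by omega
    have h2 : ((fun j => f (m + 1 - 1 - j)) ∘ Nat.succ) = fun j => f (m - 1 - j) := by
      funext j
      simp only [Function.comp, Nat.succ_eq_add_one]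
      congr 1
      omega
    simp only [h1, h2, List.singleton_append]

-- B's port, normalised to Nat ranges and List.getD
theorem altB (arr : List Int) :
    make_valley_alt arr =
      (List.range (((PySem.List.sorted arr (fun x => x) false).length + 1) / 2)).map
        (fun j => (PySem.List.sorted arr (fun x => x) false).getD
          ((PySem.List.sorted arr (fun x => x) false).length - 1 - 2 * j) 0) ++
      (List.range ((PySem.List.sorted arr (fun x => x) false).length -
          ((PySem.List.sorted arr (fun x => x) false).length + 1) / 2)).map
        (fun j => (PySem.List.sorted arr (fun x => x) false).getD
          (2 * j + (PySem.List.sorted arr (fun x => x) false).length % 2) 0) := by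
  unfold make_valley_alt
  set s := PySem.List.sorted arr (fun x => x) false with hs
  set n := s.length with hn
  have hlen : PySem.List.len s = (n : Int) := PySem.List.len_eq s
  have hh : PySem.Int.floordiv ((n : Int) + 1) 2 = (((n + 1) / 2 : Nat) : Int) := by
    have := PySem.Int.floordiv_natCast (n + 1) 2
    push_cast at this ⊢
    exact this
  have hnh : (n : Int) - (((n + 1) / 2 : Nat) : Int) = ((n - (n + 1) / 2 : Nat) : Int) := by
    have : (n + 1) / 2 ≤ n := by omega
    omega
  have hmod : PySem.Int.mod (n : Int) 2 = ((n % 2 : Nat) : Int) := PySem.Int.mod_natCast n 2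
  simp only [hlen, hh, hnh, hmod, PySem.List.pyRange_zero_natCast, List.map_map]
  congr 1
  · apply List.map_congr_left
    intro j hj
    simp only [List.mem_range] at hj
    have hc : (n : Int) - 1 - 2 * ((j : Nat) : Int) = ((n - 1 - 2 * j : Nat) : Int) := by omega
    simp only [Function.comp, hc, PySem.List.pyGetD_natCast]
  · apply List.map_congr_left
    intro j hj
    have hc : 2 * ((j : Nat) : Int) + ((n % 2 : Nat) : Int) = ((2 * j + n % 2 : Nat) : Int) := by
      omega
    simp only [Function.comp, hc, PySem.List.pyGetD_natCast]

-- ===== VERDICT (by name: the statement is the Claim_ definition above) =====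
theorem make_valley_spec : Claim_equal_make_valley := by
  intro arr _
  unfold Spec_make_valley
  rw [altB]
  unfold make_valley
  set s := PySem.List.sorted arr (fun x => x) false with hs
  set n := s.length with hn
  have hA := foldA s 0 [] []
  simp only [Nat.cast_zero] at hA
  have hlen : PySem.Int.mod (PySem.List.len s) 2 = ((n % 2 : Nat) : Int) := by
    rw [PySem.List.len_eq]
    exact_mod_cast PySem.Int.mod_natCast n 2
  simp only [hA, hlen]
  obtain ⟨he1, he2⟩ := eo_index s
  rw [← hn] at he1 he2
  rcases Nat.even_or_odd n with he | ho
  · have h0 : n % 2 = 0 := Nat.even_iff.mp he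
    simp only [h0, Nat.cast_zero, List.nil_append, if_true]
    rw [he1, he2, reverse_map_range]
    have hhalf : (n + 1) / 2 = n / 2 := by omega
    have hsub : n - (n + 1) / 2 = n / 2 := by omega
    rw [hsub, hhalf]
    congr 1
    · apply List.map_congr_left
      intro j hj
      simp only [List.mem_range] at hj
      congr 1
      omega
  · have h0 : n % 2 = 1 := Nat.odd_iff.mp ho
    have hne : ¬ ((1 : Int) = 0) := by decide
    simp only [h0, Nat.cast_one, if_true, List.nil_append]
    rw [if_neg hne]
    rw [he1, he2, reverse_map_range]
    have hsub : n - (n + 1) / 2 = n / 2 := by omega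
    rw [hsub]
    congr 1
    · apply List.map_congr_left
      intro j hj
      simp only [List.mem_range] at hj
      congr 1
      omega
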